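-- pv_equiv track=rewrite | github.com/dlejay/advent-of-code-2025 | solution.py | valid_id_part_1
-- ===== SOURCE A (Python) =====
-- def valid_id_part_1(n):
--     txt = str(n)
--     l = len(txt)
--     if (l % 2 != 0):
--         return True
--     for i in range(l // 2):
--         if txt[i] != txt[l // 2 + i]:
--             return True
--     return False
-- ===== SOURCE B (Python) =====
-- def valid_id_part_1(n):
--     # Pure integer arithmetic: no string, no per-character loop.
--     # A negative number's text starts with '-', which can never equal the
--     # digit at the start of the second half, so the halves always differ.
--     if n < 0:
--         return True
--     d, t = 1, n
--     while t >= 10: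
--         t //= 10
--         d += 1
--     if d % 2 != 0:
--         return True
--     k = d // 2
--     return n // 10 ** k != n % 10 ** k
-- ===== Notes on version B (the rewrite author's own statement) =====
-- stated objective: alternative
-- what changed: Replaces the str(n) conversion and per-character half-comparison loop with pure integer arithmetic: count digits by repeated floor division and compare the two halves as n // 10**k vs n % 10**k (negatives return True directly since '-' never matches a digit).
import Mathlib
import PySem

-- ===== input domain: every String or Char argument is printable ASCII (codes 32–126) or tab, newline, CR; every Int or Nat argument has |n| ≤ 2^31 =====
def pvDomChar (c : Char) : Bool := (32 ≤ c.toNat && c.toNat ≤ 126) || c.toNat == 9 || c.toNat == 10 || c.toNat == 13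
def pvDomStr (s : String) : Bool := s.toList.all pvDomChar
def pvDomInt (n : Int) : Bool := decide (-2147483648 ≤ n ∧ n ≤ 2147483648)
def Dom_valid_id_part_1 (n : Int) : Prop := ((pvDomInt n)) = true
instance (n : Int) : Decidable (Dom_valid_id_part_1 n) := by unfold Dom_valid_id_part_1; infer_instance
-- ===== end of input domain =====

-- B replaces A's str(n) conversion and per-character half-comparison loop by pure
-- integer arithmetic (digit count by repeated division, then n // 10**k vs n % 10**k);
-- objective: alternative (not measured faster).

-- ===== PORT A =====
def valid_id_part_1 (n : Int) : Bool :=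
  let txt := PySem.Int.toChars n
  let l : Int := PySem.List.len txt
  if PySem.Int.mod l 2 ≠ 0 then true
  else
    (PySem.List.pyRange 0 (PySem.Int.floordiv l 2) 1).any
      (fun i => PySem.List.pyGetD txt i ' ' != PySem.List.pyGetD txt (PySem.Int.floordiv l 2 + i) ' ')

-- ===== PORT B =====
-- the 'while t >= 10: t //= 10; d += 1' loop of Source B
def pvCountDigits (t : Int) (d : Int) : Int :=
  if 10 ≤ t then pvCountDigits (PySem.Int.floordiv t 10) (d + 1) else d
termination_by t.toNat
decreasing_by
  rw [PySem.Int.floordiv_eq_ediv_of_pos (by norm_num)]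
  omega

def valid_id_part_1_alt (n : Int) : Bool :=
  if n < 0 then true
  else
    let d := pvCountDigits n 1
    if PySem.Int.mod d 2 ≠ 0 then true
    else
      let k := PySem.Int.floordiv d 2
      -- 10 ** k with k ≥ 1 : Int; exponent taken as a Nat
      decide (PySem.Int.floordiv n (10 ^ k.toNat) ≠ PySem.Int.mod n (10 ^ k.toNat))

-- ===== PRECONDITION & SPEC =====
def Spec_valid_id_part_1 (n : Int) (out : Bool) : Prop := out = valid_id_part_1_alt n
instance (n : Int) (out : Bool) : Decidable (Spec_valid_id_part_1 n out) := by unfold Spec_valid_id_part_1; infer_instance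

-- ===== CLAIM (what is proved, stated in full; the proofs are below) =====
def Claim_equal_valid_id_part_1 : Prop := ∀ (n : Int), Dom_valid_id_part_1 n → Spec_valid_id_part_1 n (valid_id_part_1 n)

-- ===== LEMMAS AND PROOFS =====

-- the decimal digit characters of m, most significant first (our handle on Nat.toDigits)
def digs (m : Nat) : List Char :=
  if m < 10 then [Nat.digitChar m] else digs (m / 10) ++ [Nat.digitChar (m % 10)]
termination_by m
decreasing_by omega

-- the k-character zero-padded decimal rendering of c
def padded : Nat → Nat → List Char
  | 0, _ => []
  | k+1, c => padded k (c / 10) ++ [Nat.digitChar (c % 10)]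

theorem digs_small {m : Nat} (h : m < 10) : digs m = [Nat.digitChar m] := by
  rw [digs]; simp [h]

theorem digs_big {m : Nat} (h : ¬ m < 10) : digs m = digs (m / 10) ++ [Nat.digitChar (m % 10)] := by
  rw [digs]; simp [h]

theorem length_padded (k c : Nat) : (padded k c).length = k := by
  induction k generalizing c with
  | zero => rfl
  | succ k ih => simp [padded, ih]

theorem digitChar_inj : ∀ a < 10, ∀ b < 10, Nat.digitChar a = Nat.digitChar b → a = b := by decide

theorem digitChar_ne_dash : ∀ a < 10, Nat.digitChar a ≠ '-' := by decide

theorem padded_inj : ∀ k c₁ c₂, c₁ < 10 ^ k → c₂ < 10 ^ k → padded k c₁ = padded k c₂ → c₁ = c₂ := by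
  intro k
  induction k with
  | zero => intro c₁ c₂ h1 h2 _; simp at h1 h2; omega
  | succ k ih =>
    intro c₁ c₂ h1 h2 h
    simp only [padded] at h
    obtain ⟨hpre, hsuf⟩ := List.append_inj h (by rw [length_padded, length_padded])
    have hd : Nat.digitChar (c₁ % 10) = Nat.digitChar (c₂ % 10) := by simpa using hsuf
    have e1 : c₁ % 10 = c₂ % 10 :=
      digitChar_inj _ (Nat.mod_lt _ (by norm_num)) _ (Nat.mod_lt _ (by norm_num)) hd
    have h10 : (10:Nat) ^ (k+1) = 10 ^ k * 10 := pow_succ 10 k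
    have e2 : c₁ / 10 = c₂ / 10 := ih _ _ (by omega) (by omega) hpre
    omega

theorem toDigitsCore_eq : ∀ fuel m acc, m < fuel →
    Nat.toDigitsCore 10 fuel m acc = digs m ++ acc := by
  intro fuel
  induction fuel with
  | zero => intro m acc h; omega
  | succ fuel ih =>
    intro m acc h
    by_cases h10 : m < 10
    · have hz : m / 10 = 0 := Nat.div_eq_of_lt h10
      have hm : m % 10 = m := Nat.mod_eq_of_lt h10
      simp [Nat.toDigitsCore, hz, hm, digs_small h10]
    · have hne : ¬ m / 10 = 0 := by omega
      have : Nat.toDigitsCore 10 (fuel+1) m acc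
          = Nat.toDigitsCore 10 fuel (m / 10) (Nat.digitChar (m % 10) :: acc) := by
        simp [Nat.toDigitsCore, hne]
      rw [this, ih (m / 10) _ (by omega), digs_big h10]
      simp

theorem toDigits_eq_digs (m : Nat) : Nat.toDigits 10 m = digs m := by
  have := toDigitsCore_eq (m+1) m [] (by omega)
  simpa [Nat.toDigits] using this

theorem digs_len_pos (m : Nat) : 1 ≤ (digs m).length := by
  by_cases h : m < 10
  · simp [digs_small h]
  · simp [digs_big h]

theorem digs_ne_dash : ∀ m, ∀ ch ∈ digs m, ch ≠ '-' := by
  intro m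
  induction m using Nat.strong_induction_on with
  | _ m ih =>
    by_cases h : m < 10
    · rw [digs_small h]
      intro ch hch
      simp at hch; subst hch
      exact digitChar_ne_dash m h
    · rw [digs_big h]
      intro ch hch
      rcases List.mem_append.mp hch with hin | hin
      · exact ih (m / 10) (by omega) ch hin
      · simp at hin; subst hin
        exact digitChar_ne_dash _ (Nat.mod_lt _ (by norm_num))

theorem digs_bounds : ∀ m, 0 < m →
    10 ^ ((digs m).length - 1) ≤ m ∧ m < 10 ^ (digs m).length := by
  intro m
  induction m using Nat.strong_induction_on with
  | _ m ih =>
    intro hm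
    by_cases h : m < 10
    · rw [digs_small h]; simpa using ⟨hm, h⟩
    · have hd : 0 < m / 10 := by omega
      obtain ⟨h1, h2⟩ := ih (m / 10) (by omega) hd
      have hlp := digs_len_pos (m / 10)
      rw [digs_big h]
      simp only [List.length_append, List.length_cons, List.length_nil]
      have e1 : (10:Nat) ^ (digs (m / 10)).length = 10 ^ ((digs (m / 10)).length - 1) * 10 := by
        conv_lhs => rw [show (digs (m / 10)).length = ((digs (m / 10)).length - 1) + 1 by omega]
        rw [pow_succ]
      have e2 : (10:Nat) ^ ((digs (m / 10)).length + 1) = 10 ^ (digs (m / 10)).length * 10 :=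
        pow_succ 10 _
      simp only [Nat.zero_add, Nat.add_sub_cancel]
      omega

theorem digs_split : ∀ k a c, 0 < a → c < 10 ^ k →
    digs (a * 10 ^ k + c) = digs a ++ padded k c := by
  intro k
  induction k with
  | zero =>
    intro a c _ hc
    simp at hc
    simp [hc, padded]
  | succ k ih =>
    intro a c ha hc
    have h10 : (10:Nat) ^ (k+1) = 10 ^ k * 10 := pow_succ 10 k
    have hple : (10:Nat) ≤ 10 ^ (k+1) := by
      calc (10:Nat) = 10 ^ 1 := (pow_one 10).symm
        _ ≤ 10 ^ (k+1) := Nat.pow_le_pow_right (by norm_num) (by omega)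
    have hbig : ¬ a * 10 ^ (k+1) + c < 10 := by
      have : 10 ^ (k+1) ≤ a * 10 ^ (k+1) := Nat.le_mul_of_pos_left _ ha
      omega
    rw [digs_big hbig]
    have harr : a * 10 ^ (k+1) + c = (a * 10 ^ k) * 10 + c := by
      rw [h10, mul_assoc]
    have hdiv : (a * 10 ^ (k+1) + c) / 10 = a * 10 ^ k + c / 10 := by
      rw [harr]; omega
    have hmod : (a * 10 ^ (k+1) + c) % 10 = c % 10 := by
      rw [harr]; omega
    have hcd : c / 10 < 10 ^ k := by omega
    rw [hdiv, hmod, ih a (c / 10) ha hcd]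
    simp [padded]

theorem digs_exact : ∀ k a, 10 ^ k ≤ a → a < 10 ^ (k+1) → digs a = padded (k+1) a := by
  intro k
  induction k with
  | zero =>
    intro a h1 h2
    simp at h1 h2
    have hm : a % 10 = a := Nat.mod_eq_of_lt h2
    rw [digs_small h2]
    simp [padded, hm]
  | succ k ih =>
    intro a h1 h2
    have h10 : (10:Nat) ^ (k+1) = 10 ^ k * 10 := pow_succ 10 k
    have h10' : (10:Nat) ^ (k+2) = 10 ^ (k+1) * 10 := pow_succ 10 (k+1)
    have hple : (10:Nat) ≤ 10 ^ (k+1) := by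
      calc (10:Nat) = 10 ^ 1 := (pow_one 10).symm
        _ ≤ 10 ^ (k+1) := Nat.pow_le_pow_right (by norm_num) (by omega)
    have hbig : ¬ a < 10 := by omega
    have d1 : 10 ^ k ≤ a / 10 := by omega
    have d2 : a / 10 < 10 ^ (k+1) := by omega
    rw [digs_big hbig, ih (a / 10) d1 d2]
    simp [padded]

theorem pvCountDigits_eq : ∀ m : Nat, ∀ d : Int,
    pvCountDigits (m : Int) d = d + ((digs m).length : Int) - 1 := by
  intro m
  induction m using Nat.strong_induction_on with
  | _ m ih =>
    intro d
    by_cases h : m < 10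
    · have hc : ¬ (10:Int) ≤ (m : Int) := by exact_mod_cast not_le.mpr h
      unfold pvCountDigits
      simp [hc, digs_small h]
    · have hc : (10:Int) ≤ (m : Int) := by exact_mod_cast not_lt.mp h
      unfold pvCountDigits
      rw [if_pos hc]
      have hfd : PySem.Int.floordiv (m : Int) 10 = ((m / 10 : Nat) : Int) := by
        exact_mod_cast PySem.Int.floordiv_natCast m 10
      rw [hfd, ih (m / 10) (by omega) (d + 1), digs_big h]
      simp
      omega

theorem list_ne_iff (u v : List Char) (h : u.length = v.length) :
    u ≠ v ↔ ∃ i : Nat, i < u.length ∧ u[i]? ≠ v[i]? := by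
  constructor
  · intro hne
    by_contra hc
    apply hne
    apply List.ext_getElem?
    intro i
    by_cases hi : i < u.length
    · by_contra hne2
      exact hc ⟨i, hi, hne2⟩
    · rw [List.getElem?_eq_none (by omega), List.getElem?_eq_none (by omega)]
  · rintro ⟨i, _, hne⟩ heq
    exact hne (by rw [heq])

theorem loop_eq (u v : List Char) (k : Nat) (hu : u.length = k) (hv : v.length = k) :
    ((PySem.List.pyRange 0 (k : Int) 1).any
      (fun i => PySem.List.pyGetD (u ++ v) i ' ' != PySem.List.pyGetD (u ++ v) ((k : Int) + i) ' '))
    = decide (u ≠ v) := by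
  rw [PySem.List.pyRange_zero_nat, List.any_map]
  apply Bool.eq_iff_iff.mpr
  rw [decide_eq_true_iff, List.any_eq_true]
  rw [list_ne_iff u v (by omega)]
  have key : ∀ i : Nat, i < k →
      (((PySem.List.pyGetD (u ++ v) ((i : Nat) : Int) ' '
          != PySem.List.pyGetD (u ++ v) ((k : Int) + ((i : Nat) : Int)) ' ') = true)
        ↔ u[i]? ≠ v[i]?) := by
    intro i hi
    have hcast : (k : Int) + ((i : Nat) : Int) = ((k + i : Nat) : Int) := by push_cast; ring
    rw [PySem.List.pyGetD_natCast, hcast, PySem.List.pyGetD_natCast]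
    rw [List.getD_eq_getElem?_getD, List.getD_eq_getElem?_getD]
    rw [List.getElem?_append_left (by omega), List.getElem?_append_right (by omega)]
    have hidx : k + i - u.length = i := by omega
    rw [hidx]
    rw [List.getElem?_eq_getElem (by omega), List.getElem?_eq_getElem (by omega)]
    simp [bne_iff_ne]
  constructor
  · rintro ⟨x, hx, hp⟩
    simp only [List.mem_range] at hx
    simp only [Function.comp] at hp
    exact ⟨x, by omega, (key x hx).mp hp⟩
  · rintro ⟨i, hi, hp⟩
    rw [hu] at hi
    refine ⟨i, by simp [List.mem_range]; omega, ?_⟩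
    simp only [Function.comp]
    exact (key i hi).mpr hp

-- A returns True on every negative input: '-' never equals the digit it is compared with
theorem A_neg {n : Int} (hneg : n < 0) : valid_id_part_1 n = true := by
  unfold valid_id_part_1
  simp only [PySem.Int.toChars, if_pos hneg, toDigits_eq_digs, PySem.List.len_eq]
  rw [PySem.Int.mod_eq_emod_of_pos (show (0:Int) < 2 by norm_num),
    PySem.Int.floordiv_eq_ediv_of_pos (show (0:Int) < 2 by norm_num)]
  have hL1 : 1 ≤ (digs n.natAbs).length := digs_len_pos _
  by_cases hpar : ('-' :: digs n.natAbs).length % 2 = 0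
  · have hco : ¬ ((((('-' :: digs n.natAbs).length : Nat) : Int)) % 2 ≠ 0) := by
      simp only [List.length_cons] at hpar ⊢
      omega
    rw [if_neg hco]
    obtain ⟨h, hh⟩ : ∃ h, ('-' :: digs n.natAbs).length / 2 = h := ⟨_, rfl⟩
    have hfd : (((('-' :: digs n.natAbs).length : Nat) : Int)) / 2 = ((h : Nat) : Int) := by
      simp only [List.length_cons] at hh ⊢
      omega
    rw [hfd]
    have hh1 : 1 ≤ h := by
      simp only [List.length_cons] at hpar hh
      omega
    have hh2 : h - 1 < (digs n.natAbs).length := by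
      simp only [List.length_cons] at hpar hh
      omega
    rw [List.any_eq_true]
    refine ⟨0, ?_, ?_⟩
    · rw [PySem.List.mem_pyRange_one]
      constructor
      · norm_num
      · exact_mod_cast hh1
    · show (PySem.List.pyGetD ('-' :: digs n.natAbs) 0 ' '
        != PySem.List.pyGetD ('-' :: digs n.natAbs) (((h : Nat) : Int) + 0) ' ') = true
      have g0 : PySem.List.pyGetD ('-' :: digs n.natAbs) 0 ' ' = '-' := by
        rw [show (0 : Int) = ((0 : Nat) : Int) from rfl, PySem.List.pyGetD_natCast]
        rfl
      have gh : PySem.List.pyGetD ('-' :: digs n.natAbs) (((h : Nat) : Int) + 0) ' '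
          = (digs n.natAbs).getD (h - 1) ' ' := by
        rw [add_zero, PySem.List.pyGetD_natCast]
        rw [show h = (h - 1) + 1 by omega]
        rfl
      rw [g0, gh, bne_iff_ne]
      have hin : (digs n.natAbs).getD (h - 1) ' ' ∈ digs n.natAbs := by
        rw [List.getD_eq_getElem _ _ (by omega)]
        exact List.getElem_mem _
      have hnd := digs_ne_dash n.natAbs _ hin
      exact fun hcontra => hnd hcontra.symm
  · have hco : (((('-' :: digs n.natAbs).length : Nat) : Int)) % 2 ≠ 0 := by
      simp only [List.length_cons] at hpar ⊢
      omega
    rw [if_pos hco]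

-- the whole equivalence on nonnegative inputs
theorem main_nonneg (m : Nat) : valid_id_part_1 (m : Int) = valid_id_part_1_alt (m : Int) := by
  have hnn : ¬ ((m : Int) < 0) := by omega
  unfold valid_id_part_1 valid_id_part_1_alt
  simp only [PySem.Int.toChars, if_neg hnn, Int.toNat_natCast, toDigits_eq_digs,
    PySem.List.len_eq]
  rw [pvCountDigits_eq m 1]
  rw [show (1 : Int) + ((digs m).length : Int) - 1 = ((digs m).length : Int) from by ring]
  rw [PySem.Int.mod_eq_emod_of_pos (show (0:Int) < 2 by norm_num)]
  have hLpos := digs_len_pos m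
  by_cases hpar : (digs m).length % 2 = 0
  · -- even number of digits
    have hco : ¬ ((((digs m).length : Nat) : Int) % 2 ≠ 0) := by omega
    rw [if_neg hco, if_neg hco]
    rw [PySem.Int.floordiv_eq_ediv_of_pos (show (0:Int) < 2 by norm_num)]
    obtain ⟨k, hk⟩ : ∃ k, (digs m).length = 2 * k := ⟨(digs m).length / 2, by omega⟩
    have hfd : (((digs m).length : Nat) : Int) / 2 = ((k : Nat) : Int) := by omega
    rw [hfd, Int.toNat_natCast]
    have hk1 : 1 ≤ k := by omega
    have hm10 : ¬ m < 10 := by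
      intro hlt
      have : (digs m).length = 1 := by rw [digs_small hlt]; rfl
      omega
    have hm0 : 0 < m := by omega
    obtain ⟨hlow, hhigh⟩ := digs_bounds m hm0
    have hPk : (0:Nat) < 10 ^ k := by positivity
    have eL : (10:Nat) ^ (digs m).length = 10 ^ k * 10 ^ k := by
      rw [hk, two_mul, pow_add]
    have eL1 : (10:Nat) ^ ((digs m).length - 1) = 10 ^ (k - 1) * 10 ^ k := by
      rw [← pow_add, show k - 1 + k = (digs m).length - 1 by omega]
    have hclt : m % 10 ^ k < 10 ^ k := Nat.mod_lt _ hPk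
    have haU : m / 10 ^ k < 10 ^ k := by
      rw [Nat.div_lt_iff_lt_mul hPk, ← eL]
      exact hhigh
    have haL : 10 ^ (k - 1) ≤ m / 10 ^ k := by
      rw [Nat.le_div_iff_mul_le hPk, ← eL1]
      exact hlow
    have ha0 : 0 < m / 10 ^ k := lt_of_lt_of_le (by positivity) haL
    have hmsum : m = (m / 10 ^ k) * 10 ^ k + m % 10 ^ k := by
      rw [mul_comm]
      exact (Nat.div_add_mod m (10 ^ k)).symm
    have hsplit : digs m = padded k (m / 10 ^ k) ++ padded k (m % 10 ^ k) := by
      conv_lhs => rw [hmsum]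
      rw [digs_split k _ _ ha0 hclt]
      congr 1
      have hx := digs_exact (k - 1) (m / 10 ^ k) haL
        (by rw [show k - 1 + 1 = k by omega]; exact haU)
      rw [hx, show k - 1 + 1 = k by omega]
    rw [hsplit]
    have hloop := loop_eq (padded k (m / 10 ^ k)) (padded k (m % 10 ^ k)) k
      (length_padded _ _) (length_padded _ _)
    rw [hloop]
    -- the B side
    have hpow : ((10 : Int) ^ k) = ((10 ^ k : Nat) : Int) := by push_cast; ring
    rw [hpow]
    have hfda : PySem.Int.floordiv (m : Int) ((10 ^ k : Nat) : Int)
        = ((m / 10 ^ k : Nat) : Int) := by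
      exact_mod_cast PySem.Int.floordiv_natCast m (10 ^ k)
    have hmda : PySem.Int.mod (m : Int) ((10 ^ k : Nat) : Int)
        = ((m % 10 ^ k : Nat) : Int) := by
      exact_mod_cast PySem.Int.mod_natCast m (10 ^ k)
    rw [hfda, hmda]
    have hiff : (padded k (m / 10 ^ k) ≠ padded k (m % 10 ^ k))
        ↔ (((m / 10 ^ k : Nat) : Int) ≠ ((m % 10 ^ k : Nat) : Int)) := by
      constructor
      · intro hne hcast
        exact hne (by rw [show m / 10 ^ k = m % 10 ^ k from by exact_mod_cast hcast])
      · intro hne hpad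
        exact hne (by rw [padded_inj k _ _ haU hclt hpad])
    exact decide_eq_decide.mpr hiff
  · -- odd number of digits: both sides return True
    have hco : (((digs m).length : Nat) : Int) % 2 ≠ 0 := by omega
    rw [if_pos hco, if_pos hco]

-- ===== VERDICT (by name: the statement is the Claim_ definition above) =====
theorem valid_id_part_1_spec : Claim_equal_valid_id_part_1 := by
  intro n _
  unfold Spec_valid_id_part_1
  by_cases hneg : n < 0
  · rw [A_neg hneg]
    unfold valid_id_part_1_alt
    rw [if_pos hneg]
  · have hn : n = (n.toNat : Int) := (Int.toNat_of_nonneg (by omega)).symm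
    rw [hn]
    exact main_nonneg n.toNat
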